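-- pv_equiv track=rewrite | github.com/tkoz0/problems-hackerrank | missing-numbers.py | missingNumbers
-- ===== SOURCE A (Python) =====
-- def missingNumbers(arr, brr):
--     # Write your code here
--     af = dict()
--     bf = dict()
--     for a in arr:
--         if a not in af:
--             af[a] = 0
--         af[a] += 1
--     for b in brr:
--         if b not in bf:
--             bf[b] = 0
--         bf[b] += 1
--     ret = []
--     for n in bf.keys():
--         if n not in af or af[n] != bf[n]:
--             ret.append(n)
--     return sorted(ret)
-- ===== SOURCE B (Python) =====
-- def missingNumbers(arr, brr):
--     # Sort both lists once, then merge-scan them with two pointers, grouping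
--     # equal values into runs; a value goes to the result when its run lengths
--     # differ.  The result comes out already sorted, so no final sort is needed.
--     sa = sorted(arr)
--     sb = sorted(brr)
--     res = []
--     i = 0  # pointer into sa
--     j = 0  # pointer into sb
--     while j < len(sb):
--         v = sb[j]
--         while i < len(sa) and sa[i] < v:
--             i += 1
--         ca = 0
--         while i < len(sa) and sa[i] == v:
--             ca += 1
--             i += 1
--         cb = 1
--         j += 1
--         while j < len(sb) and sb[j] == v:
--             cb += 1
--             j += 1
--         if ca != cb:
--             res.append(v)
--     return res
-- ===== Notes on version B (the rewrite author's own statement) =====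
-- stated objective: alternative
-- what changed: Replaced the two frequency dicts, the key loop and the final sort by sorting both lists once and merge-scanning them with two pointers over runs of equal values, emitting differing run lengths directly in sorted order.
import Mathlib
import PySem

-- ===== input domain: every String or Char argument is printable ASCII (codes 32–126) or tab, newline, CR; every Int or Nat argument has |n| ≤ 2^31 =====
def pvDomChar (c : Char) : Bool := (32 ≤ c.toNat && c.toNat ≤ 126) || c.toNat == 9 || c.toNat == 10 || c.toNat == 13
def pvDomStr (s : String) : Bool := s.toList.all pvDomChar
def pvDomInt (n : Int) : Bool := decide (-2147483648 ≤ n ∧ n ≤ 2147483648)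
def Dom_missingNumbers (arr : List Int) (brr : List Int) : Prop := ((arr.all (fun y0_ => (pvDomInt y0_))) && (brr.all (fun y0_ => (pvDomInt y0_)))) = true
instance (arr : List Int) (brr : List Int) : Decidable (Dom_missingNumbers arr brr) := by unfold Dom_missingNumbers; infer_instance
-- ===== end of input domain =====

-- B replaces the two frequency dicts, the key loop and the final sort by a merge scan of
-- the two sorted lists that compares run lengths of equal values (alternative algorithm).

-- ===== PORT A =====
def missingNumbers (arr : List Int) (brr : List Int) : List Int :=
  let af := arr.foldl (fun d a =>
    let d := if d.contains a then d else d.insert a (0 : Int);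
    d.insert a (d.getD a 0 + 1)) PySem.Dict.empty
  let bf := brr.foldl (fun d b =>
    let d := if d.contains b then d else d.insert b (0 : Int);
    d.insert b (d.getD b 0 + 1)) PySem.Dict.empty
  let ret := (PySem.Dict.keys bf).foldl (fun ret n =>
    if !af.contains n || af.getD n 0 != bf.getD n 0 then ret ++ [n] else ret) []
  PySem.List.sorted ret (fun x => x) false

-- ===== PORT B =====
-- 'while i < len(sa) and sa[i] < v: i += 1' : drop the prefix of elements < v
def pvSkipLt (v : Int) : List Int → List Int
  | [] => []
  | x :: xs => if x < v then pvSkipLt v xs else x :: xs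

-- 'c = 0; while ... and l[i] == v: c += 1; i += 1' : count and drop the prefix of elements = v
def pvCountEq (v : Int) : List Int → Nat × List Int
  | [] => (0, [])
  | x :: xs =>
    if x == v then
      let r := pvCountEq v xs
      (r.1 + 1, r.2)
    else (0, x :: xs)

theorem pvCountEq_len (v : Int) (l : List Int) : (pvCountEq v l).2.length ≤ l.length := by
  induction l with
  | nil => simp [pvCountEq]
  | cons x xs ih =>
    simp only [pvCountEq]
    split
    · exact le_trans ih (by simp)
    · simp

-- the outer 'while j < len(sb)' loop of B
def pvScan (sa sb : List Int) : List Int :=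
  match sb with
  | [] => []
  | v :: sb' =>
    let sa1 := pvSkipLt v sa
    let pa := pvCountEq v sa1
    let pb := pvCountEq v sb'
    (if pa.1 ≠ pb.1 + 1 then [v] else []) ++ pvScan pa.2 pb.2
termination_by sb.length
decreasing_by
  simpa using Nat.lt_succ_of_le (pvCountEq_len v sb')

def missingNumbers_alt (arr : List Int) (brr : List Int) : List Int :=
  pvScan (PySem.List.sorted arr (fun x => x) false) (PySem.List.sorted brr (fun x => x) false)

-- ===== PRECONDITION & SPEC =====
def Spec_missingNumbers (arr : List Int) (brr : List Int) (out : List Int) : Prop := out = missingNumbers_alt arr brr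
instance (arr : List Int) (brr : List Int) (out : List Int) : Decidable (Spec_missingNumbers arr brr out) := by unfold Spec_missingNumbers; infer_instance

-- ===== CLAIM (what is proved, stated in full; the proofs are below) =====
def Claim_equal_missingNumbers : Prop := ∀ (arr : List Int) (brr : List Int), Dom_missingNumbers arr brr → Spec_missingNumbers arr brr (missingNumbers arr brr)

-- ===== LEMMAS AND PROOFS =====

-- A's dict-building step is the standard counter step
theorem pvStepA_eq (d : PySem.Dict Int Int) (x : Int) :
    (let d' := if d.contains x then d else d.insert x (0 : Int);
     d'.insert x (d'.getD x 0 + 1)) = d.insert x (d.getD x 0 + 1) := by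
  by_cases h : d.contains x = true
  · simp [h]
  · simp only [h, if_neg, Bool.not_eq_true]
    rw [PySem.Dict.getD_insert_self, PySem.Dict.insert_insert_self,
      PySem.Dict.getD_of_not_contains d 0 (by simpa using h)]

-- skipLt keeps counts of values ≥ v
theorem pvSkipLt_count (v w : Int) (l : List Int) (hw : v ≤ w) :
    (pvSkipLt v l).count w = l.count w := by
  induction l with
  | nil => rfl
  | cons x xs ih =>
    simp only [pvSkipLt]
    split
    · rename_i hx
      have hne : x ≠ w := by omega
      rw [ih]
      simp [hne]
    · rfl

-- skipLt keeps sortedness and leaves only elements ≥ v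
theorem pvSkipLt_ge (v : Int) (l : List Int) (hs : l.Pairwise (· ≤ ·)) :
    (pvSkipLt v l).Pairwise (· ≤ ·) ∧ ∀ x ∈ pvSkipLt v l, v ≤ x := by
  induction l with
  | nil => simp [pvSkipLt]
  | cons x xs ih =>
    rcases List.pairwise_cons.mp hs with ⟨hx, hxs⟩
    simp only [pvSkipLt]
    split
    · exact ih hxs
    · rename_i hlt
      refine ⟨List.pairwise_cons.mpr ⟨hx, hxs⟩, ?_⟩
      intro y hy
      rcases List.mem_cons.mp hy with rfl | hy
      · omega
      · exact le_trans (by omega) (hx y hy)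

-- countEq on a sorted list whose elements are all ≥ v
theorem pvCountEq_spec (v : Int) (l : List Int) (hs : l.Pairwise (· ≤ ·))
    (hge : ∀ x ∈ l, v ≤ x) :
    (pvCountEq v l).1 = l.count v ∧
    (pvCountEq v l).2.Pairwise (· ≤ ·) ∧
    (∀ x ∈ (pvCountEq v l).2, v < x) ∧
    (∀ w, w ≠ v → (pvCountEq v l).2.count w = l.count w) := by
  induction l with
  | nil => simp [pvCountEq]
  | cons x xs ih =>
    rcases List.pairwise_cons.mp hs with ⟨hx, hxs⟩
    simp only [pvCountEq]
    split
    · rename_i hxv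
      have hxv' : x = v := by simpa using hxv
      obtain ⟨h1, h2, h3, h4⟩ := ih hxs (fun y hy => hge y (List.mem_cons_of_mem _ hy))
      refine ⟨?_, h2, h3, ?_⟩
      · simp [h1, hxv']
      · intro w hw
        rw [h4 w hw]
        simp [hxv', Ne.symm hw]
    · rename_i hxv
      have hxv' : x ≠ v := by simpa using hxv
      have hvx : v < x := lt_of_le_of_ne (hge x (List.mem_cons_self)) (Ne.symm hxv')
      have hvxs : xs.count v = 0 :=
        List.count_eq_zero.mpr (fun hmem => absurd (hx v hmem) (by omega))
      refine ⟨?_, List.pairwise_cons.mpr ⟨hx, hxs⟩, ?_, fun w _ => rfl⟩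
      · simp [hvxs, hxv']
      · intro y hy
        rcases List.mem_cons.mp hy with rfl | hy
        · exact hvx
        · exact lt_of_lt_of_le hvx (hx y hy)

-- the merge scan computes, in strictly increasing order, the values of sb whose counts differ
theorem pvScan_spec (n : Nat) (sb sa : List Int) (hn : sb.length ≤ n)
    (hsa : sa.Pairwise (· ≤ ·)) (hsb : sb.Pairwise (· ≤ ·)) :
    (pvScan sa sb).Pairwise (· < ·) ∧
    (∀ w, w ∈ pvScan sa sb ↔ (w ∈ sb ∧ sa.count w ≠ sb.count w)) := by
  induction n generalizing sb sa with
  | zero =>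
    have : sb = [] := List.eq_nil_of_length_eq_zero (Nat.le_zero.mp hn)
    subst this
    simp [pvScan]
  | succ n ih =>
    match sb with
    | [] => simp [pvScan]
    | v :: sb' =>
      have hunf : pvScan sa (v :: sb') =
          (if (pvCountEq v (pvSkipLt v sa)).1 ≠ (pvCountEq v sb').1 + 1 then [v] else []) ++
            pvScan (pvCountEq v (pvSkipLt v sa)).2 (pvCountEq v sb').2 := by
        rw [pvScan]
      rcases List.pairwise_cons.mp hsb with ⟨hv, hsb'⟩
      obtain ⟨hs1, hge1⟩ := pvSkipLt_ge v sa hsa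
      obtain ⟨ha1, ha2, ha3, ha4⟩ := pvCountEq_spec v (pvSkipLt v sa) hs1 hge1
      obtain ⟨hb1, hb2, hb3, hb4⟩ := pvCountEq_spec v sb' hsb' hv
      have hlen : (pvCountEq v sb').2.length ≤ n :=
        le_trans (pvCountEq_len v sb') (Nat.le_of_succ_le_succ hn)
      obtain ⟨hp, hm⟩ := ih (pvCountEq v sb').2 (pvCountEq v (pvSkipLt v sa)).2 hlen ha2 hb2
      have hca : (pvCountEq v (pvSkipLt v sa)).1 = sa.count v := by
        rw [ha1, pvSkipLt_count v v sa le_rfl]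
      have hacnt : ∀ w, v < w → (pvCountEq v (pvSkipLt v sa)).2.count w = sa.count w := by
        intro w hw
        rw [ha4 w (by omega), pvSkipLt_count v w sa (le_of_lt hw)]
      have hbcnt : ∀ w, w ≠ v → (pvCountEq v sb').2.count w = (v :: sb').count w := by
        intro w hw
        rw [hb4 w hw]
        simp [Ne.symm hw]
      have hmem : ∀ w, w ∈ pvScan (pvCountEq v (pvSkipLt v sa)).2 (pvCountEq v sb').2 →
          v < w := fun w h => hb3 w ((hm w).mp h).1
      rw [hunf]
      constructor
      · rw [List.pairwise_append]
        refine ⟨?_, hp, ?_⟩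
        · split <;> simp
        · intro a ha b hb
          split at ha
          · simp at ha; subst ha; exact hmem b hb
          · simp at ha
      · intro w
        rw [List.mem_append, hm w]
        have hwsb' : ∀ _ : w ≠ v, (w ∈ (pvCountEq v sb').2 ↔ w ∈ sb') := by
          intro hw
          rw [← List.count_pos_iff, ← List.count_pos_iff, hb4 w hw]
        by_cases hwv : w = v
        · subst hwv
          have hvc : (w :: sb').count w = sb'.count w + 1 := by simp
          constructor
          · rintro (h | h)
            · split at h
              · rename_i hne
                refine ⟨List.mem_cons_self, ?_⟩
                rw [hca, hb1] at hne
                rw [hvc]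
                omega
              · simp at h
            · exact absurd (hb3 w h.1) (lt_irrefl w)
          · rintro ⟨_, hne⟩
            left
            rw [if_pos ?_]
            · simp
            · rw [hca, hb1]
              rw [hvc] at hne
              omega
        · have hwgt : w ∈ sb' → v < w :=
            fun h => lt_of_le_of_ne (hv w h) (Ne.symm hwv)
          constructor
          · rintro (h | h)
            · split at h <;> simp at h
              exact absurd h hwv
            · obtain ⟨hw1, hw2⟩ := h
              have hvw : v < w := hb3 w hw1
              refine ⟨List.mem_cons_of_mem _ ((hwsb' hwv).mp hw1), ?_⟩
              rw [hacnt w hvw, hbcnt w hwv] at hw2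
              exact hw2
          · rintro ⟨hw1, hw2⟩
            rcases List.mem_cons.mp hw1 with rfl | hw1
            · exact absurd rfl hwv
            · right
              refine ⟨(hwsb' hwv).mpr hw1, ?_⟩
              rw [hacnt w (hwgt hw1), hbcnt w hwv]
              exact hw2

-- ===== VERDICT (by name: the statement is the Claim_ definition above) =====
theorem missingNumbers_spec : Claim_equal_missingNumbers := by
  intro arr brr _
  show missingNumbers arr brr = missingNumbers_alt arr brr
  -- A's side: the two loops are counters, the key loop is a filter
  have hstep : ∀ (xs : List Int),
      xs.foldl (fun d a =>
        let d := if d.contains a then d else d.insert a (0 : Int);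
        d.insert a (d.getD a 0 + 1)) PySem.Dict.empty = PySem.Dict.counter xs := by
    intro xs
    rw [← PySem.Dict.foldl_insert_getD_add_one_eq_counter]
    exact PySem.List.foldl_congr_mem _ _ _ _ (fun d a _ => pvStepA_eq d a)
  unfold missingNumbers
  simp only [hstep]
  rw [PySem.List.foldl_append_if, List.nil_append, List.map_id', PySem.Dict.keys_counter]
  -- reduce the filter predicate to a count comparison, for members of brr
  have hfil : (PySem.Set.ofList brr).filter
        (fun n => !(PySem.Dict.counter arr).contains n ||
          (PySem.Dict.counter arr).getD n 0 != (PySem.Dict.counter brr).getD n 0)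
      = (PySem.Set.ofList brr).filter (fun n => decide (arr.count n ≠ brr.count n)) := by
    apply List.filter_congr
    intro n hn
    have hnb : n ∈ brr := (PySem.Set.mem_ofList brr n).mp hn
    rw [PySem.Dict.contains_counter, PySem.Dict.getD_counter, PySem.Dict.getD_counter]
    by_cases hc : arr.count n = brr.count n
    · have hpos : 0 < arr.count n := hc ▸ List.count_pos_iff.mpr hnb
      have hna : n ∈ arr := List.count_pos_iff.mp hpos
      simp [hna, hc]
    · by_cases hna : n ∈ arr <;> simp [hna, hc]
  rw [hfil]
  -- B's side: the merge scan of the two sorted lists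
  have hsa : (PySem.List.sorted arr (fun x => x) false).Pairwise (· ≤ ·) := by
    simpa using PySem.List.sorted_pairwise arr (fun x => x)
  have hsb : (PySem.List.sorted brr (fun x => x) false).Pairwise (· ≤ ·) := by
    simpa using PySem.List.sorted_pairwise brr (fun x => x)
  obtain ⟨hp, hm⟩ := pvScan_spec (PySem.List.sorted brr (fun x => x) false).length
    (PySem.List.sorted brr (fun x => x) false)
    (PySem.List.sorted arr (fun x => x) false) le_rfl hsa hsb
  show _ = pvScan (PySem.List.sorted arr (fun x => x) false) (PySem.List.sorted brr (fun x => x) false)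
  -- the scan result is the strictly increasing rearrangement of the filtered key list
  have hnd1 : (pvScan (PySem.List.sorted arr (fun x => x) false)
      (PySem.List.sorted brr (fun x => x) false)).Nodup := hp.imp (fun h => ne_of_lt h)
  have hnd2 : ((PySem.Set.ofList brr).filter
      (fun n => decide (arr.count n ≠ brr.count n))).Nodup :=
    (PySem.Set.nodup_ofList brr).filter _
  refine PySem.List.sorted_eq_of_perm_of_pairwise_lt _ _ _
    ((List.perm_ext_iff_of_nodup hnd1 hnd2).mpr ?_) hp
  intro w
  rw [hm w, PySem.List.mem_sorted,
    (PySem.List.sorted_perm arr (fun x => x) false).count_eq,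
    (PySem.List.sorted_perm brr (fun x => x) false).count_eq,
    List.mem_filter, PySem.Set.mem_ofList]
  simp
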